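-- pv_equiv track=rewrite | github.com/sefcom/operation-mango-public | package/argument_resolver/handlers/local_handler.py | bfs_with_stop_nodes
-- ===== SOURCE A (Python) =====
-- from collections import deque
--
-- def bfs_with_stop_nodes(graph, start_nodes, stop_nodes):
--     visited = set()
--     queue = deque(start_nodes)
--
--     while queue:
--         current_node = queue.popleft()
--
--         if current_node in stop_nodes:
--             continue  # Skip and do not explore from this node
--
--         if current_node not in visited:
--             visited.add(current_node)
--             if current_node in graph:
--                 neighbors = list(graph[current_node])
--                 queue.extend(neighbors)
--
--     return visited
-- ===== SOURCE B (Python) =====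
-- def bfs_with_stop_nodes(graph, start_nodes, stop_nodes):
--     # Level-synchronous traversal: expand whole generations at once instead of a deque.
--     visited = set()
--     frontier = list(start_nodes)
--     while frontier:
--         nxt = []
--         for node in frontier:
--             if node not in stop_nodes and node not in visited:
--                 visited.add(node)
--                 nxt.extend(graph.get(node, ()))
--         frontier = nxt
--     return visited
-- ===== Notes on version B (the rewrite author's own statement) =====
-- stated objective: alternative
-- what changed: Replaces the deque-driven FIFO loop by a level-synchronous traversal: each iteration processes one whole frontier generation with a plain for-loop and collects the next generation in a fresh list, so no queue data structure is maintained.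
import Mathlib
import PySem

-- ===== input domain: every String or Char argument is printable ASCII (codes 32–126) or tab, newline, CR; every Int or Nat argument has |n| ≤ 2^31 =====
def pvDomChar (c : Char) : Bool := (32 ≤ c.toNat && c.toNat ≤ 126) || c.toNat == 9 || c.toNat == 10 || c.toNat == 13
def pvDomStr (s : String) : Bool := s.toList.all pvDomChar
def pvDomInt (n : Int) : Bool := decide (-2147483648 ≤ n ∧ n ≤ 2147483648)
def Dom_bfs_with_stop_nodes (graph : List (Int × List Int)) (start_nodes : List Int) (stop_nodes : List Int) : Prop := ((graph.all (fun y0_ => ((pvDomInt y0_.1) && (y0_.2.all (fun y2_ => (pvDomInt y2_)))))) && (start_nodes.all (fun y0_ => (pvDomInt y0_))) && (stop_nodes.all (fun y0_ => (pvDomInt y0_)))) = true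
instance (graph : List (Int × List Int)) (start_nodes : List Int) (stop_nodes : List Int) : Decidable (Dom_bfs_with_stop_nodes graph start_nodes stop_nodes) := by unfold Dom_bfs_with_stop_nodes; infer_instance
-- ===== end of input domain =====

-- ===== PORT A =====
-- B replaces A's deque-driven FIFO loop by a level-synchronous traversal (process a whole
-- frontier generation, collect the next one in a fresh list); same visited set, built in the same order.

-- helpers used by the ports' termination proofs (cited by name in decreasing_by)
def pvUnvis (graph : List (Int × List Int)) (visited : PySem.Set Int) : Nat :=
  ((graph.map Prod.fst).filter (fun k => !(PySem.Set.contains visited k))).length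

theorem pvFilterLenLe (l : List Int) (p q : Int → Bool) (h : ∀ a ∈ l, p a → q a) :
    (l.filter p).length ≤ (l.filter q).length := by
  induction l with
  | nil => simp
  | cons a t ih =>
    have ih' := ih (fun x hx => h x (List.mem_cons_of_mem _ hx))
    simp only [List.filter_cons]
    by_cases hp : p a
    · simp [hp, h a (by simp) hp]; omega
    · simp only [hp, Bool.false_eq_true, if_false]
      split
      · simp; omega
      · exact ih'

theorem pvFilterLenLt (l : List Int) (p q : Int → Bool) (a : Int) (ha : a ∈ l)
    (hpa : p a = false) (hqa : q a = true) (h : ∀ x ∈ l, p x → q x) :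
    (l.filter p).length < (l.filter q).length := by
  induction l with
  | nil => simp at ha
  | cons b t ih =>
    have hle := pvFilterLenLe t p q (fun x hx => h x (List.mem_cons_of_mem _ hx))
    simp only [List.filter_cons]
    rcases List.mem_cons.1 ha with rfl | hat
    · simp [hpa, hqa]; omega
    · have ih' := ih hat (fun x hx => h x (List.mem_cons_of_mem _ hx))
      by_cases hp : p b
      · simp [hp, h b (by simp) hp]; omega
      · simp only [hp, Bool.false_eq_true, if_false]
        split
        · simp; omega
        · exact ih'

theorem pvContains_add_of (v : PySem.Set Int) (x k : Int) (h : PySem.Set.contains v k = true) :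
    PySem.Set.contains (PySem.Set.add v x) k = true := by
  simp only [PySem.Set.add]
  split
  · exact h
  · simp only [PySem.Set.contains] at h ⊢
    simp only [List.contains_append, h, Bool.true_or]

theorem pvUnvis_add_le (graph : List (Int × List Int)) (v : PySem.Set Int) (x : Int) :
    pvUnvis graph (PySem.Set.add v x) ≤ pvUnvis graph v := by
  unfold pvUnvis
  apply pvFilterLenLe
  intro k _ hk
  simp only [Bool.not_eq_true'] at hk ⊢
  by_contra hc
  simp only [Bool.not_eq_false] at hc
  rw [pvContains_add_of v x k hc] at hk
  exact absurd hk (by simp)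

theorem pvUnvis_add_lt (graph : List (Int × List Int)) (v : PySem.Set Int) (x : Int)
    (hmem : x ∈ graph.map Prod.fst) (hnv : PySem.Set.contains v x = false) :
    pvUnvis graph (PySem.Set.add v x) < pvUnvis graph v := by
  unfold pvUnvis
  apply pvFilterLenLt _ _ _ x hmem
  · simp
  · simpa using hnv
  · intro k _ hk
    simp only [Bool.not_eq_true'] at hk ⊢
    by_contra hc
    simp only [Bool.not_eq_false] at hc
    rw [pvContains_add_of v x k hc] at hk
    exact absurd hk (by simp)

theorem pvGet_mem (graph : List (Int × List Int)) (x : Int) (ns : List Int)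
    (h : (PySem.Dict.mk graph).get? x = some ns) : x ∈ graph.map Prod.fst := by
  induction graph with
  | nil => simp [PySem.Dict.get?] at h
  | cons p rest ih =>
    rw [PySem.Dict.get?_mk_cons] at h
    by_cases he : p.1 == x
    · simp only [List.map_cons, List.mem_cons]
      exact Or.inl (by exact (beq_iff_eq.1 he).symm)
    · simp only [he, Bool.false_eq_true, if_false] at h
      exact List.mem_cons_of_mem _ (ih h)

theorem pvGet_not_mem (graph : List (Int × List Int)) (x : Int)
    (h : (PySem.Dict.mk graph).get? x = none) : x ∉ graph.map Prod.fst := by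
  induction graph with
  | nil => simp  -- h unused in base case
  | cons p rest ih =>
    rw [PySem.Dict.get?_mk_cons] at h
    by_cases he : p.1 == x
    · simp [he] at h
    · simp only [he, Bool.false_eq_true, if_false] at h
      simp only [List.map_cons, List.mem_cons, not_or]
      exact ⟨fun hx => he (by simp [hx]), ih h⟩

theorem pvUnvis_add_eq (graph : List (Int × List Int)) (v : PySem.Set Int) (x : Int)
    (hx : x ∉ graph.map Prod.fst) :
    pvUnvis graph (PySem.Set.add v x) = pvUnvis graph v := by
  unfold pvUnvis
  congr 1
  apply List.filter_congr
  intro k hk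
  have hne : (x == k) = false := by
    refine beq_eq_false_iff_ne.2 ?_
    rintro rfl; exact hx hk
  simp only [PySem.Set.add]
  split
  · rfl
  · simp only [PySem.Set.contains, List.contains_append]
    have hne' : x ≠ k := beq_eq_false_iff_ne.1 hne
    simp [Ne.symm hne']

-- the while-loop of A: FIFO queue, popleft, extend with the popped node's neighbours
def bfsLoop (graph : List (Int × List Int)) (stop_nodes : List Int) :
    List Int → PySem.Set Int → PySem.Set Int
  | [], visited => visited
  | current :: queue, visited =>
    if stop_nodes.contains current then
      bfsLoop graph stop_nodes queue visited
    else if PySem.Set.contains visited current then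
      bfsLoop graph stop_nodes queue visited
    else
      match h : (PySem.Dict.mk graph).get? current with
      | some neighbors =>
          bfsLoop graph stop_nodes (queue ++ neighbors) (PySem.Set.add visited current)
      | none => bfsLoop graph stop_nodes queue (PySem.Set.add visited current)
  termination_by queue visited => (pvUnvis graph visited, queue.length)
  decreasing_by
  · exact Prod.Lex.right _ (Nat.lt_succ_self _)
  · exact Prod.Lex.right _ (Nat.lt_succ_self _)
  · exact Prod.Lex.left _ _ (pvUnvis_add_lt graph visited current (pvGet_mem graph current neighbors h) (by simpa using ‹¬ PySem.Set.contains visited current = true›))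
  · rw [pvUnvis_add_eq graph visited current (pvGet_not_mem graph current h)]
    exact Prod.Lex.right _ (Nat.lt_succ_self _)

def bfs_with_stop_nodes (graph : List (Int × List Int)) (start_nodes : List Int) (stop_nodes : List Int) : List Int :=
  bfsLoop graph stop_nodes start_nodes PySem.Set.empty

-- ===== PORT B =====
-- one generation: B's for-loop over the frontier; returns (visited, nxt)
def levelStep (graph : List (Int × List Int)) (stop_nodes : List Int) :
    List Int → PySem.Set Int → PySem.Set Int × List Int
  | [], visited => (visited, [])
  | node :: rest, visited =>
    if !stop_nodes.contains node && !(PySem.Set.contains visited node) then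
      let ns := ((PySem.Dict.mk graph).get? node).getD []
      let r := levelStep graph stop_nodes rest (PySem.Set.add visited node)
      (r.1, ns ++ r.2)
    else
      levelStep graph stop_nodes rest visited

theorem pvLevelStep_measure (graph : List (Int × List Int)) (stop_nodes : List Int)
    (frontier : List Int) : ∀ (v : PySem.Set Int),
    pvUnvis graph (levelStep graph stop_nodes frontier v).1 ≤ pvUnvis graph v ∧
    (pvUnvis graph (levelStep graph stop_nodes frontier v).1 = pvUnvis graph v →
      (levelStep graph stop_nodes frontier v).2 = []) := by
  induction frontier with
  | nil => intro v; simp [levelStep]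
  | cons node rest ih =>
    intro v
    rw [levelStep]
    by_cases hc : (!stop_nodes.contains node && !(PySem.Set.contains v node)) = true
    · simp only [hc, if_true]
      obtain ⟨ih1, ih2⟩ := ih (PySem.Set.add v node)
      have hle := pvUnvis_add_le graph v node
      refine ⟨le_trans ih1 hle, ?_⟩
      intro heq
      have hnv : PySem.Set.contains v node = false := by
        simp only [Bool.and_eq_true, Bool.not_eq_true'] at hc; exact hc.2
      have hnmem : node ∉ graph.map Prod.fst := by
        intro hmem
        have := pvUnvis_add_lt graph v node hmem hnv
        omega
      have hnone : (PySem.Dict.mk graph).get? node = none := by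
        cases hg : (PySem.Dict.mk graph).get? node with
        | none => rfl
        | some ns => exact absurd (pvGet_mem graph node ns hg) hnmem
      have heq' : pvUnvis graph (PySem.Set.add v node) = pvUnvis graph v :=
        pvUnvis_add_eq graph v node hnmem
      simp only [hnone, Option.getD_none, List.nil_append]
      exact ih2 (by omega)
    · simp only [hc, Bool.false_eq_true, if_false]
      exact ih v

-- the while-loop of B over generations
def levelLoop (graph : List (Int × List Int)) (stop_nodes : List Int)
    (frontier : List Int) (visited : PySem.Set Int) : PySem.Set Int :=
  if frontier.isEmpty then visited
  else
    let r := levelStep graph stop_nodes frontier visited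
    levelLoop graph stop_nodes r.2 r.1
  termination_by (pvUnvis graph visited, if frontier.isEmpty then 0 else 1)
  decreasing_by
    obtain ⟨hle, heq⟩ := pvLevelStep_measure graph stop_nodes frontier visited
    rcases lt_or_eq_of_le hle with hlt | he
    · exact Prod.Lex.left _ _ hlt
    · rw [he, heq he]
      have hne : frontier.isEmpty = false := by
        simpa using ‹¬ frontier.isEmpty = true›
      rw [hne]
      exact Prod.Lex.right _ (by simp)

def bfs_with_stop_nodes_alt (graph : List (Int × List Int)) (start_nodes : List Int) (stop_nodes : List Int) : List Int :=
  levelLoop graph stop_nodes start_nodes PySem.Set.empty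

-- ===== PRECONDITION & SPEC =====
def Spec_bfs_with_stop_nodes (graph : List (Int × List Int)) (start_nodes : List Int) (stop_nodes : List Int) (out : List Int) : Prop := out = bfs_with_stop_nodes_alt graph start_nodes stop_nodes
instance (graph : List (Int × List Int)) (start_nodes : List Int) (stop_nodes : List Int) (out : List Int) : Decidable (Spec_bfs_with_stop_nodes graph start_nodes stop_nodes out) := by unfold Spec_bfs_with_stop_nodes; infer_instance

-- ===== CLAIM (what is proved, stated in full; the proofs are below) =====
def Claim_equal_bfs_with_stop_nodes : Prop := ∀ (graph : List (Int × List Int)) (start_nodes : List Int) (stop_nodes : List Int), Dom_bfs_with_stop_nodes graph start_nodes stop_nodes → Spec_bfs_with_stop_nodes graph start_nodes stop_nodes (bfs_with_stop_nodes graph start_nodes stop_nodes)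

-- ===== LEMMAS AND PROOFS =====
-- the queue of A is always "rest of the current generation ++ already discovered next generation"
theorem bfsLoop_level (graph : List (Int × List Int)) (stop_nodes : List Int)
    (frontier : List Int) :
    ∀ (pending : List Int) (v : PySem.Set Int),
      bfsLoop graph stop_nodes (frontier ++ pending) v =
        bfsLoop graph stop_nodes (pending ++ (levelStep graph stop_nodes frontier v).2)
          (levelStep graph stop_nodes frontier v).1 := by
  induction frontier with
  | nil => intro pending v; simp [levelStep]
  | cons c fs ih =>
    intro pending v
    rw [List.cons_append, bfsLoop, levelStep]
    by_cases hs : stop_nodes.contains c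
    · simp only [hs, if_true, Bool.not_true, Bool.false_and, Bool.false_eq_true, if_false]
      exact ih pending v
    · by_cases hv : PySem.Set.contains v c
      · simp only [hs, hv, if_true, Bool.false_eq_true, if_false, Bool.not_true,
          Bool.and_false, Bool.not_false]
        exact ih pending v
      · simp only [hs, hv, Bool.false_eq_true, if_false, Bool.not_false, Bool.true_and,
          if_true]
        cases hg : (PySem.Dict.mk graph).get? c with
        | some ns =>
          simp only [Option.getD_some]
          rw [List.append_assoc]
          rw [ih (pending ++ ns) (PySem.Set.add v c)]
          rw [List.append_assoc]
        | none =>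
          simp only [Option.getD_none, List.nil_append]
          exact ih pending (PySem.Set.add v c)

theorem bfsLoop_eq_levelLoop (graph : List (Int × List Int)) (stop_nodes : List Int)
    (frontier : List Int) (visited : PySem.Set Int) :
    bfsLoop graph stop_nodes frontier visited = levelLoop graph stop_nodes frontier visited := by
  induction frontier, visited using levelLoop.induct graph stop_nodes with
  | case1 frontier visited he =>
    rw [levelLoop, if_pos he]
    rw [List.isEmpty_iff.1 he, bfsLoop]
  | case2 frontier visited he r ih =>
    rw [levelLoop, if_neg he]
    have h0 := bfsLoop_level graph stop_nodes frontier [] visited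
    rw [List.append_nil, List.nil_append] at h0
    rw [h0]
    exact ih

-- ===== VERDICT (by name: the statement is the Claim_ definition above) =====
theorem bfs_with_stop_nodes_spec : Claim_equal_bfs_with_stop_nodes := by
  intro graph start_nodes stop_nodes _
  unfold Spec_bfs_with_stop_nodes bfs_with_stop_nodes bfs_with_stop_nodes_alt
  exact bfsLoop_eq_levelLoop graph stop_nodes start_nodes PySem.Set.empty
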